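-- pv_equiv track=rewrite | github.com/lgragert/nn-sero-pytorch | aa-matching/impute_nuc.py | checkComplete
-- ===== SOURCE A (Python) =====
-- def checkComplete(sequence, seqIns):
--     checkIns = []
--     idx = sequence.find('-')
--     if (idx != -1):
--         checkIns.append(idx)
--     while (idx != -1):
--         idx = sequence.find('-', idx + 1)
--         if (idx != -1):
--             checkIns.append(idx)
--     checkIns = [x for x in checkIns if x not in seqIns]
--     return checkIns
-- ===== SOURCE B (Python) =====
-- def checkComplete(sequence, seqIns):
--     return [i for i, c in enumerate(sequence) if c == '-' and i not in seqIns]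
-- ===== Notes on version B (the rewrite author's own statement) =====
-- stated objective: idiomatic
-- what changed: A chains str.find('-', idx+1) calls to collect dash positions and then filters them against seqIns in a second list pass; B is a single fused pass over the characters with enumerate, testing the dash and the membership together.
import Mathlib
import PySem

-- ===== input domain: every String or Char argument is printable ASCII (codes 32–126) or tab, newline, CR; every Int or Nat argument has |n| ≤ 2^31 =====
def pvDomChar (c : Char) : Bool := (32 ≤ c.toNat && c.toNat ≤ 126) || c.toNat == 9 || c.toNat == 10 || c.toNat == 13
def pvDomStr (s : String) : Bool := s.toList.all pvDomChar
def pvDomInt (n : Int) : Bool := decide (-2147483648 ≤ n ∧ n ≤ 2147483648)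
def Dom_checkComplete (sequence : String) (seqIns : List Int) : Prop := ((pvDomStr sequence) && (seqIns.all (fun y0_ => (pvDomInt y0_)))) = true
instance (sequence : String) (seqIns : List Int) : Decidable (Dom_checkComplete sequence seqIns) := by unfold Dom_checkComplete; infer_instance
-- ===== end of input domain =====

-- B replaces A's chain of str.find('-', idx+1) calls plus a second filtering pass by one
-- fused enumerate pass over the characters (idiomatic; same cost).

-- ===== PORT A =====
-- the while loop: idx = sequence.find('-', idx + 1); append idx while it is not -1.
-- fuel (length + 1) bounds the iteration count: each found index is strictly larger than the last.
def chkLoop (sequence : String) (idx : Int) : Nat → List Int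
  | 0 => []
  | fuel + 1 =>
    if idx = -1 then []
    else
      let idx' := PySem.Str.findFrom sequence "-" (idx + 1) none
      if idx' = -1 then [] else idx' :: chkLoop sequence idx' fuel

def checkComplete (sequence : String) (seqIns : List Int) : List Int :=
  let idx := PySem.Str.find sequence "-"
  let checkIns : List Int := if idx ≠ -1 then [idx] else []
  let checkIns := checkIns ++ chkLoop sequence idx (sequence.toList.length + 1)
  checkIns.filter (fun x => !(seqIns.contains x))

-- ===== PORT B =====
def checkComplete_alt (sequence : String) (seqIns : List Int) : List Int :=
  (PySem.List.enumerate sequence.toList 0).filterMap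
    (fun p => if p.2 == '-' && !(seqIns.contains p.1) then some p.1 else none)

-- ===== PRECONDITION & SPEC =====
def Spec_checkComplete (sequence : String) (seqIns : List Int) (out : List Int) : Prop := out = checkComplete_alt sequence seqIns
instance (sequence : String) (seqIns : List Int) (out : List Int) : Decidable (Spec_checkComplete sequence seqIns out) := by unfold Spec_checkComplete; infer_instance

-- ===== CLAIM (what is proved, stated in full; the proofs are below) =====
def Claim_equal_checkComplete : Prop := ∀ (sequence : String) (seqIns : List Int), Dom_checkComplete sequence seqIns → Spec_checkComplete sequence seqIns (checkComplete sequence seqIns)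

-- ===== LEMMAS AND PROOFS =====

-- the ascending list of dash positions, as B collects them before the membership test
def dashIdx (l : List Char) : List Int :=
  (PySem.List.enumerate l 0).filterMap (fun p => if p.2 == '-' then some p.1 else none)

lemma mem_dashIdx (l : List Char) (x : Int) :
    x ∈ dashIdx l ↔ ∃ k : Nat, ∃ _ : k < l.length, x = (k : Int) ∧ l[k]? = some '-' := by
  unfold dashIdx
  rw [List.mem_filterMap]
  constructor
  · rintro ⟨p, hp, hf⟩
    rcases (PySem.List.mem_enumerate_iff l 0 p).mp hp with ⟨k, hk, rfl⟩
    by_cases h : l[k] = '-'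
    · exact ⟨k, hk, by simpa [h] using hf.symm, by simp [hk, h]⟩
    · simp [h] at hf
  · rintro ⟨k, hk, rfl, hd⟩
    have h : l[k] = '-' := by
      rcases List.getElem?_eq_some_iff.mp hd with ⟨_, h⟩; exact h
    exact ⟨((k : Int), l[k]), (PySem.List.mem_enumerate_iff l 0 _).mpr ⟨k, hk, by simp⟩,
      by simp [h]⟩

lemma pairwise_dashIdx (l : List Char) : (dashIdx l).Pairwise (· < ·) := by
  unfold dashIdx
  rw [List.pairwise_filterMap]
  refine (PySem.List.pairwise_lt_enumerate l 0).imp ?_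
  intro p q h b hb b' hb'
  split at hb <;> split at hb' <;> simp_all

lemma singleton_prefix_iff (a : Char) (xs : List Char) : [a] <+: xs ↔ xs.head? = some a := by
  cases xs <;> simp [List.cons_prefix_cons, eq_comm]

lemma singleton_infix_iff (a : Char) (xs : List Char) : [a] <:+: xs ↔ a ∈ xs := by
  constructor
  · intro h; exact List.singleton_sublist.mp h.sublist
  · intro h
    obtain ⟨s, t, rfl⟩ := List.append_of_mem h
    exact ⟨s, t, by simp⟩

lemma mem_drop_iff (l : List Char) (j : Nat) (a : Char) :
    a ∈ l.drop j ↔ ∃ k : Nat, ∃ _ : k < l.length, j ≤ k ∧ l[k]? = some a := by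
  rw [List.mem_iff_getElem]
  constructor
  · rintro ⟨m, hm, hma⟩
    have hlen : (l.drop j).length = l.length - j := List.length_drop
    have hjm : j + m < l.length := by omega
    refine ⟨j + m, hjm, by omega, ?_⟩
    rw [List.getElem?_eq_some_iff]
    exact ⟨hjm, by rw [← hma, List.getElem_drop]⟩
  · rintro ⟨k, hk, hjk, hka⟩
    have hlen : (l.drop j).length = l.length - j := List.length_drop
    refine ⟨k - j, by omega, ?_⟩
    rcases List.getElem?_eq_some_iff.mp hka with ⟨_, h⟩
    rw [List.getElem_drop]
    have : j + (k - j) = k := by omega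
    simp_rw [this]
    exact h

lemma filter_sorted_none (xs : List Int) (j : Int) (h : ∀ x ∈ xs, ¬ j ≤ x) :
    xs.filter (fun x => decide (j ≤ x)) = [] := by
  rw [List.filter_eq_nil_iff]
  intro a ha
  simpa using h a ha

lemma filter_sorted_split (xs : List Int) (hs : xs.Pairwise (· < ·)) (i j : Int)
    (hji : j ≤ i) (hi : i ∈ xs) (hmin : ∀ x ∈ xs, j ≤ x → i ≤ x) :
    xs.filter (fun x => decide (j ≤ x)) = i :: xs.filter (fun x => decide (i + 1 ≤ x)) := by
  induction xs with
  | nil => simp at hi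
  | cons y ys ih =>
    rcases List.pairwise_cons.mp hs with ⟨hy, hys⟩
    rcases List.mem_cons.mp hi with rfl | hi'
    · simp only [List.filter_cons, decide_eq_true_eq]
      rw [if_pos hji, if_neg (by omega)]
      congr 1
      apply List.filter_congr
      intro x hx
      have := hy x hx
      simp only [decide_eq_decide]
      omega
    · have hyi : y < i := hy i hi'
      have hjy : ¬ j ≤ y := fun h => absurd (hmin y (by simp) h) (by omega)
      simp only [List.filter_cons, decide_eq_true_eq]
      rw [if_neg hjy, if_neg (by omega)]
      exact ih hys hi' (fun x hx hjx => hmin x (List.mem_cons_of_mem _ hx) hjx)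

lemma chkLoop_eq (s : String) (i : Nat) (fuel : Nat)
    (hd : s.toList[i]? = some '-')
    (hfuel : s.toList.length - i ≤ fuel) :
    chkLoop s (i : Int) fuel
      = (dashIdx s.toList).filter (fun x => decide ((i : Int) + 1 ≤ x)) := by
  have hi : i < s.toList.length := (List.getElem?_eq_some_iff.mp hd).1
  induction fuel generalizing i with
  | zero => omega
  | succ fuel ih =>
    have hne : (i : Int) ≠ -1 := by omega
    rw [chkLoop, if_neg hne]
    have hml : ("-" : String).toList = ['-'] := rfl
    have hcast : (i : Int) + 1 = ((i + 1 : Nat) : Int) := by push_cast; ring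
    have hk : i + 1 ≤ s.toList.length := hi
    by_cases hz : PySem.Str.findFrom s "-" ((i : Int) + 1) none = -1
    · rw [if_pos hz]
      have hz' : PySem.Chars.findFrom s.toList ['-'] ((i + 1 : Nat) : Int) none = -1 := by
        rw [← hcast, ← hml, ← PySem.Str.findFrom_eq]; exact hz
      have hno : ¬ ['-'] <:+: s.toList.drop (i + 1) :=
        (PySem.Chars.findFrom_natCast_eq_neg_one_iff s.toList ['-'] (i + 1) hk).mp hz'
      symm
      apply filter_sorted_none
      intro x hx hle
      rcases (mem_dashIdx _ x).mp hx with ⟨k, hklt, rfl, hkd⟩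
      have hik : i + 1 ≤ k := by omega
      exact hno ((singleton_infix_iff _ _).mpr
        ((mem_drop_iff _ _ _).mpr ⟨k, hklt, hik, hkd⟩))
    · rw [if_neg hz]
      have hz' : PySem.Chars.findFrom s.toList ['-'] ((i + 1 : Nat) : Int) none ≠ -1 := by
        rw [← hcast, ← hml, ← PySem.Str.findFrom_eq]; exact hz
      obtain ⟨h1, h2, h3⟩ :=
        PySem.Chars.findFrom_natCast_spec s.toList ['-'] (i + 1) hk hz'
      set idxC := PySem.Chars.findFrom s.toList ['-'] ((i + 1 : Nat) : Int) none with hidxC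
      have hSC : PySem.Str.findFrom s "-" ((i : Int) + 1) none = idxC := by
        rw [PySem.Str.findFrom_eq, hml, hcast]
      set n := idxC.toNat with hn
      have h0 : (0 : Int) ≤ idxC := le_trans (by omega) h1
      have hidxn : idxC = (n : Int) := (Int.toNat_of_nonneg h0).symm
      have hdn : s.toList[n]? = some '-' := by
        rw [← List.head?_drop]
        exact (singleton_prefix_iff _ _).mp h2
      have hnlt : n < s.toList.length := (List.getElem?_eq_some_iff.mp hdn).1
      have hin : i + 1 ≤ n := by omega
      rw [hSC, hidxn, ih n hdn (by omega) hnlt]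
      symm
      apply filter_sorted_split (dashIdx s.toList) (pairwise_dashIdx _) ((n : Int)) ((i : Int) + 1)
        (by omega) ((mem_dashIdx _ _).mpr ⟨n, hnlt, rfl, hdn⟩)
      intro x hx hle
      rcases (mem_dashIdx _ x).mp hx with ⟨k, hklt, rfl, hkd⟩
      by_contra hlt
      have hkn : k < n := by omega
      exact h3 k (by omega) hkn ((singleton_prefix_iff _ _).mpr (by rw [List.head?_drop]; exact hkd))

lemma fuse_filterMap (xs : List (Int × Char)) (P : Int → Bool) :
    xs.filterMap (fun p => if p.2 == '-' && P p.1 then some p.1 else none)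
      = (xs.filterMap (fun p => if p.2 == '-' then some p.1 else none)).filter P := by
  induction xs with
  | nil => simp
  | cons p xs ih =>
    simp only [List.filterMap_cons]
    by_cases h1 : (p.2 == '-') = true
    · by_cases h2 : P p.1 = true
      · rw [if_pos (by rw [h1, h2]; rfl), if_pos h1, List.filter_cons, if_pos h2, ih]
      · have h2' : P p.1 = false := by simpa using h2
        rw [if_neg (by rw [h1, h2']; simp), if_pos h1, List.filter_cons, if_neg h2, ih]
    · have h1' : (p.2 == '-') = false := by simpa using h1
      rw [if_neg (by rw [h1']; simp), if_neg (by rw [h1']; simp)]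
      exact ih

lemma dashIdx_eq_nil (l : List Char) (h : '-' ∉ l) : dashIdx l = [] := by
  unfold dashIdx
  rw [List.filterMap_eq_nil_iff]
  intro p hp
  rcases (PySem.List.mem_enumerate_iff l 0 p).mp hp with ⟨k, hk, rfl⟩
  have : l[k] ≠ '-' := fun he => h (he ▸ List.getElem_mem hk)
  simp [this]

lemma dashIdx_filter_zero (l : List Char) :
    (dashIdx l).filter (fun x => decide ((0 : Int) ≤ x)) = dashIdx l := by
  rw [List.filter_eq_self]
  intro a ha
  rcases (mem_dashIdx _ a).mp ha with ⟨k, _, rfl, _⟩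
  simp

-- ===== VERDICT (by name: the statement is the Claim_ definition above) =====
theorem checkComplete_spec : Claim_equal_checkComplete := by
  unfold Claim_equal_checkComplete
  intro s seqIns _
  unfold Spec_checkComplete
  have halt : checkComplete_alt s seqIns
      = (dashIdx s.toList).filter (fun x => !(seqIns.contains x)) :=
    fuse_filterMap (PySem.List.enumerate s.toList 0) (fun x => !(seqIns.contains x))
  rw [halt]
  unfold checkComplete
  have hml : ("-" : String).toList = ['-'] := rfl
  set l := s.toList with hl
  by_cases hz : PySem.Str.find s "-" = -1
  · have hno : ¬ ['-'] <:+: l := by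
      have := (PySem.Str.find_eq_neg_one_iff s "-").mp hz
      rwa [hml] at this
    have hnil : dashIdx l = [] := dashIdx_eq_nil l (fun h => hno ((singleton_infix_iff _ _).mpr h))
    simp only [hz, ne_eq, not_true_eq_false, if_false, List.nil_append]
    rw [chkLoop, if_pos rfl, hnil]
  · have hCeq : PySem.Str.find s "-" = PySem.Chars.find l ['-'] := by
      rw [PySem.Str.find_eq, hml]
    have hge : (0 : Int) ≤ PySem.Chars.find l ['-'] := by
      have := PySem.Chars.neg_one_le_find l ['-']
      rw [hCeq] at hz; omega
    obtain ⟨h2, h3⟩ := PySem.Chars.find_spec hge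
    set n := (PySem.Chars.find l ['-']).toNat with hn
    have hidxn : PySem.Chars.find l ['-'] = (n : Int) := (Int.toNat_of_nonneg hge).symm
    have hdn : l[n]? = some '-' := by
      rw [← List.head?_drop]
      exact (singleton_prefix_iff _ _).mp h2
    have hnlt : n < l.length := (List.getElem?_eq_some_iff.mp hdn).1
    have hmain : chkLoop s ((n : Int)) (l.length + 1)
        = (dashIdx l).filter (fun x => decide ((n : Int) + 1 ≤ x)) :=
      chkLoop_eq s n (l.length + 1) hdn (by rw [← hl]; omega)
    have hsplit : (dashIdx l).filter (fun x => decide ((0 : Int) ≤ x))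
        = (n : Int) :: (dashIdx l).filter (fun x => decide ((n : Int) + 1 ≤ x)) := by
      apply filter_sorted_split (dashIdx l) (pairwise_dashIdx l) ((n : Int)) 0 (by omega)
        ((mem_dashIdx _ _).mpr ⟨n, hnlt, rfl, hdn⟩)
      intro x hx _
      rcases (mem_dashIdx _ x).mp hx with ⟨k, hklt, rfl, hkd⟩
      by_contra hlt
      have hkn : k < n := by omega
      exact h3 k hkn ((singleton_prefix_iff _ _).mpr (by rw [List.head?_drop]; exact hkd))
    simp only [hz, ne_eq, not_false_eq_true, if_true]
    rw [hCeq, hidxn, hmain, List.singleton_append, ← hsplit, dashIdx_filter_zero]
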